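-- pv_equiv track=rewrite | github.com/simzim/artificial-intelligence-exercises | exercise1/maze_resolver.py | path_validation
-- ===== SOURCE A (Python) =====
-- def get_neighbours(maze, position):
--     # neighbours = []
--     # for road in maze:
--     #     if road[0] == position:
--     #         neighbours.append(road[1])
--     neighbours = [road[1] for road in maze if road[0] == position]
--     return neighbours
--
-- def path_validation(path, maze):
--     i = 0
--     while i < len(path) - 1:
--         if node_validation(path[i], path[i + 1], maze):
--             i = i + 1
--         else:
--             path.pop(i + 1)
--
--     return path
--
-- def node_validation(prew, next, maze):
--     if next in get_neighbours(maze, prew):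
--         return True
--     else:
--         return False
-- ===== SOURCE B (Python) =====
-- def path_validation(path, maze):
--     if not path:
--         return path
--     edges = set(map(tuple, maze))
--     result = [path[0]]
--     for node in path[1:]:
--         if (result[-1], node) in edges:
--             result.append(node)
--     path[:] = result
--     return path
-- ===== Notes on version B (the rewrite author's own statement) =====
-- stated objective: faster
-- what changed: Replaces A's destructive while-loop that pops invalid nodes in place (rescanning the maze list per check) with a single forward accumulator pass over an edge set built once, copied back via path[:] = result.
import Mathlib
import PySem

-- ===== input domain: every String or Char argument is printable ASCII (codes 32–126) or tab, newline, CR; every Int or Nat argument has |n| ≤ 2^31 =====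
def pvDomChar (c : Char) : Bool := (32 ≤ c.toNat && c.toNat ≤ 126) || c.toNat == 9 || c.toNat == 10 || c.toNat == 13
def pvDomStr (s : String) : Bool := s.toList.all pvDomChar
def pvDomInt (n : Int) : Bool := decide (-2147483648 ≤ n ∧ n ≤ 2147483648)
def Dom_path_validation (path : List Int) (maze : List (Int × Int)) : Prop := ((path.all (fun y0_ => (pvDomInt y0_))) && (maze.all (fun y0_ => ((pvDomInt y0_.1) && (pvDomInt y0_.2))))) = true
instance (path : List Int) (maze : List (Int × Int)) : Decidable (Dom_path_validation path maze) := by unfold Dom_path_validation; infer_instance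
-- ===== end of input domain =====

-- B replaces A's destructive while-loop-with-pop by a single accumulator pass over an edge
-- set built once (faster in a timing run's asymptotics; the Python B performs the same
-- in-place mutation as A via path[:] = result, and this equivalence is about the return value).

-- ===== PORT A =====
def get_neighbours (maze : List (Int × Int)) (position : Int) : List Int :=
  (maze.filter (fun road => road.1 == position)).map (fun road => road.2)

def node_validation (prew : Int) (next : Int) (maze : List (Int × Int)) : Bool :=
  if (get_neighbours maze prew).contains next then true else false

-- A's while-loop: i is the cursor, path.pop(i+1) = eraseIdx (i+1)
def pvLoopA (path : List Int) (i : Nat) (maze : List (Int × Int)) : List Int :=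
  if h : i < path.length - 1 then
    if node_validation (path.getD i 0) (path.getD (i + 1) 0) maze then
      pvLoopA path (i + 1) maze
    else
      pvLoopA (path.eraseIdx (i + 1)) i maze
  else path
termination_by path.length - i
decreasing_by
  · omega
  · simp only [List.length_eraseIdx]
    split <;> omega

def path_validation (path : List Int) (maze : List (Int × Int)) : List Int :=
  pvLoopA path 0 maze

-- ===== PORT B =====
-- 'for node in path[1:]: append node iff (result[-1], node) in edges'
def pvGoB (edges : PySem.Set (Int × Int)) (last : Int) : List Int → List Int
  | [] => []
  | x :: xs => if PySem.Set.contains edges (last, x) then x :: pvGoB edges x xs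
               else pvGoB edges last xs

def path_validation_alt (path : List Int) (maze : List (Int × Int)) : List Int :=
  match path with
  | [] => path
  | h :: t => h :: pvGoB (PySem.Set.ofList maze) h t

-- ===== PRECONDITION & SPEC =====
def Spec_path_validation (path : List Int) (maze : List (Int × Int)) (out : List Int) : Prop := out = path_validation_alt path maze
instance (path : List Int) (maze : List (Int × Int)) (out : List Int) : Decidable (Spec_path_validation path maze out) := by unfold Spec_path_validation; infer_instance

-- ===== CLAIM (what is proved, stated in full; the proofs are below) =====
def Claim_equal_path_validation : Prop := ∀ (path : List Int) (maze : List (Int × Int)), Dom_path_validation path maze → Spec_path_validation path maze (path_validation path maze)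

-- ===== LEMMAS AND PROOFS =====

-- A's edge test agrees with B's set membership
theorem nv_eq_mem (prew next : Int) (maze : List (Int × Int)) :
    node_validation prew next maze
      = PySem.Set.contains (PySem.Set.ofList maze) (prew, next) := by
  simp [node_validation, get_neighbours, PySem.Set.mem_ofList, List.mem_filter]

theorem eraseIdx_app (l₁ l₂ : List Int) (n : Nat) :
    (l₁ ++ l₂).eraseIdx (l₁.length + n) = l₁ ++ l₂.eraseIdx n := by
  induction l₁ with
  | nil => simp
  | cons a t ih => simp [Nat.succ_add, ih]

-- the loop invariant: with path = pre ++ last :: rest and cursor at pre.length,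
-- A's loop keeps pre ++ [last] and processes rest like B's pvGoB
theorem loopA_eq (maze : List (Int × Int)) (rest : List Int) :
    ∀ (pre : List Int) (last : Int),
      pvLoopA (pre ++ last :: rest) pre.length maze
        = pre ++ last :: pvGoB (PySem.Set.ofList maze) last rest := by
  induction rest with
  | nil =>
      intro pre last
      rw [pvLoopA]
      simp [pvGoB]
  | cons x xs ih =>
      intro pre last
      rw [pvLoopA]
      have hlen : pre.length < (pre ++ last :: x :: xs).length - 1 := by
        simp
      have hget1 : (pre ++ last :: x :: xs).getD pre.length 0 = last := by
        simp [List.getD]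
      have hget2 : (pre ++ last :: x :: xs).getD (pre.length + 1) 0 = x := by
        simp [List.getD]
      rw [dif_pos hlen, hget1, hget2, nv_eq_mem]
      cases hmem : PySem.Set.contains (PySem.Set.ofList maze) (last, x) with
      | true =>
          rw [if_pos rfl]
          have hsplit : pre ++ last :: x :: xs = (pre ++ [last]) ++ x :: xs := by simp
          have hl : pre.length + 1 = (pre ++ [last]).length := by simp
          rw [hsplit, hl, ih (pre ++ [last]) x]
          simp only [pvGoB]
          rw [if_pos hmem]
          simp
      | false =>
          rw [if_neg (by simp)]
          have herase : (pre ++ last :: x :: xs).eraseIdx (pre.length + 1)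
              = pre ++ last :: xs := by
            have := eraseIdx_app pre (last :: x :: xs) 1
            simpa using this
          rw [herase, ih pre last]
          simp only [pvGoB]
          rw [if_neg (by simpa using hmem)]

-- ===== VERDICT (by name: the statement is the Claim_ definition above) =====
theorem path_validation_spec : Claim_equal_path_validation := by
  intro path maze _
  unfold Spec_path_validation path_validation path_validation_alt
  cases path with
  | nil => rw [pvLoopA]; simp
  | cons h t => exact loopA_eq maze t [] h
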